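-- pv_equiv track=rewrite | github.com/DailyCommitStudy/Ohs-practice-repository | PGS/코딩테스트 문제풀이/[PGS] 코딩문제풀이_level1-1.py | solution
-- ===== SOURCE A (Python) =====
-- def solution(a, b, n):
--     quotient = 0
--     take_coke = 0
--     while n >= a:
--         quotient = n // a
--         n = n - (quotient * a) + (quotient * b)
--         take_coke += quotient * b
--     return take_coke
-- ===== SOURCE B (Python) =====
-- def solution(a, b, n):
--     if n < a:
--         return 0
--     return b * ((n - a) // (a - b) + 1)
-- ===== Notes on version B (the rewrite author's own statement) =====
-- stated objective: simpler
-- what changed: Replaces the repeated-exchange while loop by the closed form b*((n-a)//(a-b)+1) for n>=a (0 otherwise).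
-- outside the precondition, e.g. on solution(3, -5, 10): A returns -15, B returns -5; on solution(2, 3, 5): A does not finish within the time limit, B returns -6; on solution(0, 0, 1): A raises ZeroDivisionError, B raises ZeroDivisionError
import Mathlib
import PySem

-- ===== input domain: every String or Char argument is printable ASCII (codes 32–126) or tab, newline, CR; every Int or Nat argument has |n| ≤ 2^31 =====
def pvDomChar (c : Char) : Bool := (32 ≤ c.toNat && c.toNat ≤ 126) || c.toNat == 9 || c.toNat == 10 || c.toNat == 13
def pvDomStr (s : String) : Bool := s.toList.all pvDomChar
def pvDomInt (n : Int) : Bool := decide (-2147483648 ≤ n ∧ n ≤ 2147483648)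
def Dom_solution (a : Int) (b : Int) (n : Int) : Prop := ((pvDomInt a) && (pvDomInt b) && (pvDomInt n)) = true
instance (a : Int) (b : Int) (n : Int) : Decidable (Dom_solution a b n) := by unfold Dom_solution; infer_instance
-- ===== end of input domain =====

-- B replaces A's repeated-exchange loop by a single closed-form expression (objective: simpler).

-- ===== PORT A =====
-- the while loop of A; the extra guard conjuncts (0 < a ∧ b < a) only make the
-- recursion total in Lean (on those inputs Python's loop diverges or raises, excluded by Pre_)
def solutionLoop (a : Int) (b : Int) (n : Int) (take : Int) : Int :=
  if h : a ≤ n ∧ 0 < a ∧ b < a then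
    let q := PySem.Int.floordiv n a
    solutionLoop a b (n - q * a + q * b) (take + q * b)
  else take
termination_by n.toNat
decreasing_by
  obtain ⟨hn, ha, hba⟩ := h
  have h1 := PySem.Int.floordiv_mul_add_mod n a
  have h3 : 1 ≤ PySem.Int.floordiv n a := by
    rw [PySem.Int.le_floordiv_iff_mul_le ha]; omega
  have h5 : (a - b) ≤ PySem.Int.floordiv n a * (a - b) :=
    le_mul_of_one_le_left (by omega) h3
  have h6 : PySem.Int.floordiv n a * (a - b) =
      PySem.Int.floordiv n a * a - PySem.Int.floordiv n a * b := by ring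
  omega

def solution (a : Int) (b : Int) (n : Int) : Int :=
  solutionLoop a b n 0

-- ===== PORT B =====
def solution_alt (a : Int) (b : Int) (n : Int) : Int :=
  if n < a then 0 else b * (PySem.Int.floordiv (n - a) (a - b) + 1)

-- ===== PRECONDITION & SPEC =====
-- Pre_ excludes the inputs where A's loop diverges (b ≥ a) or divides by zero (a = 0),
-- and restricts the entered loop to the task's natural domain of nonnegative bottle
-- counts 0 ≤ b < a with 0 < a (for negative b or a, A's looped value is outside the
-- coke-exchange meaning of the function and B does not reproduce it).
def Pre_solution (a : Int) (b : Int) (n : Int) : Prop :=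
  n < a ∨ (0 < a ∧ 0 ≤ b ∧ b < a)
instance (a : Int) (b : Int) (n : Int) : Decidable (Pre_solution a b n) := by
  unfold Pre_solution; infer_instance
def pvWitness_solution : Int × Int × Int := (3, 1, 10)

def Spec_solution (a : Int) (b : Int) (n : Int) (out : Int) : Prop := out = solution_alt a b n
instance (a : Int) (b : Int) (n : Int) (out : Int) : Decidable (Spec_solution a b n out) := by unfold Spec_solution; infer_instance

-- ===== CLAIM (what is proved, stated in full; the proofs are below) =====
def Claim_equal_solution : Prop := ∀ (a : Int) (b : Int) (n : Int), Dom_solution a b n → Pre_solution a b n → Spec_solution a b n (solution a b n)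

-- ===== LEMMAS AND PROOFS =====

-- loop invariant: with 0 < a, 0 ≤ b < a and 0 ≤ n, the loop adds exactly B's closed form
lemma solutionLoop_eq (a b : Int) (ha : 0 < a) (hb : 0 ≤ b) (hba : b < a) :
    ∀ k n take, n.toNat ≤ k → 0 ≤ n →
      solutionLoop a b n take = take + solution_alt a b n := by
  intro k
  induction k with
  | zero =>
    intro n take hk hn
    have hn0 : n = 0 := by omega
    subst hn0
    rw [solutionLoop, solution_alt]
    simp only [show ¬(a ≤ (0:Int) ∧ 0 < a ∧ b < a) from by omega, dif_neg,
      not_false_iff, if_pos (by omega : (0:Int) < a)]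
    ring
  | succ k ih =>
    intro n take hk hn
    rw [solutionLoop]
    by_cases hcase : a ≤ n
    · rw [dif_pos ⟨hcase, ha, hba⟩]
      have h1 := PySem.Int.floordiv_mul_add_mod n a
      have h2 := PySem.Int.mod_nonneg n ha
      have h2' := PySem.Int.mod_lt n ha
      have h3 : 1 ≤ PySem.Int.floordiv n a := by
        rw [PySem.Int.le_floordiv_iff_mul_le ha]; omega
      set q := PySem.Int.floordiv n a with hq
      have h4 : b ≤ q * b := le_mul_of_one_le_left hb h3
      have h5 : (a - b) ≤ q * (a - b) := le_mul_of_one_le_left (by omega) h3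
      have h6 : q * (a - b) = q * a - q * b := by ring
      set n' := n - q * a + q * b with hn'
      have hn'0 : 0 ≤ n' := by omega
      have hlt : n' < n := by omega
      rw [ih n' (take + q * b) (by omega) hn'0]
      -- remains: take + q*b + alt n' = take + alt n
      have hab : 0 < a - b := by omega
      rw [solution_alt, solution_alt, if_neg (by omega : ¬ n < a)]
      by_cases hrec : n' < a
      · rw [if_pos hrec]
        -- floordiv (n-a) (a-b) = q - 1
        have : PySem.Int.floordiv (n - a) (a - b) = q - 1 := by
          rw [PySem.Int.floordiv_eq_iff_of_pos hab]
          constructor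
          · -- (q-1)*(a-b) ≤ n - a, using b ≤ n' (from h4, h2)
            have hbn' : b ≤ n' := by omega
            nlinarith
          · -- n - a < q*(a-b), from n' < a
            nlinarith
        rw [this]; ring
      · rw [if_neg hrec]
        have hq2 : PySem.Int.floordiv (n - a) (a - b)
            = PySem.Int.floordiv (n' - a) (a - b) + q := by
          have hb2 := PySem.Int.floordiv_mul_add_mod (n' - a) (a - b)
          have hm0 := PySem.Int.mod_nonneg (n' - a) hab
          have hm1 := PySem.Int.mod_lt (n' - a) hab
          rw [PySem.Int.floordiv_eq_iff_of_pos hab]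
          constructor <;> nlinarith
        rw [hq2]; ring
    · rw [dif_neg (by tauto), solution_alt, if_pos (by omega)]; ring

-- ===== VERDICT (by name: the statement is the Claim_ definition above) =====
theorem solution_spec : Claim_equal_solution := by
  intro a b n _ hpre
  unfold Spec_solution solution
  by_cases hna : n < a
  · rw [solutionLoop, dif_neg (by omega), solution_alt, if_pos hna]
  · obtain h | ⟨ha, hb, hba⟩ := hpre
    · omega
    · have := solutionLoop_eq a b ha hb hba n.toNat n 0 le_rfl (by omega)
      omega
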